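-- pv_equiv track=rewrite | github.com/TuLingZb/my_microblog | wraps_.py | get_dict_list
-- ===== SOURCE A (Python) =====
-- def get_dict_list(list):
--     dict = {}
--     for i in list:
--         if dict.get(len(i)):
--             if i not in dict.get(len(i)):
--                 dict[len(i)].append(i)
--             continue
--         dict[len(i)] = [i]
--     return dict
-- ===== SOURCE B (Python) =====
-- def get_dict_list(list):
--     # Pass 1: group every item (duplicates included) by its length.
--     index = {}
--     for i in list:
--         index.setdefault(len(i), []).append(i)
--     # Pass 2: rebuild each bucket as an order-preserving dedup (list membership).
--     result = {}
--     for k, bucket in index.items():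
--         uniq = []
--         for x in bucket:
--             if x not in uniq:
--                 uniq.append(x)
--         result[k] = uniq
--     return result
-- ===== Notes on version B (the rewrite author's own statement) =====
-- stated objective: alternative
-- what changed: A dedups while grouping in one interleaved loop (membership test against the growing bucket on every item); B is two separate passes: first group every item by length into full buckets (setdefault+append, duplicates kept), then rebuild each bucket as an order-preserving dedup with a fresh list-membership loop.
import Mathlib
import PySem

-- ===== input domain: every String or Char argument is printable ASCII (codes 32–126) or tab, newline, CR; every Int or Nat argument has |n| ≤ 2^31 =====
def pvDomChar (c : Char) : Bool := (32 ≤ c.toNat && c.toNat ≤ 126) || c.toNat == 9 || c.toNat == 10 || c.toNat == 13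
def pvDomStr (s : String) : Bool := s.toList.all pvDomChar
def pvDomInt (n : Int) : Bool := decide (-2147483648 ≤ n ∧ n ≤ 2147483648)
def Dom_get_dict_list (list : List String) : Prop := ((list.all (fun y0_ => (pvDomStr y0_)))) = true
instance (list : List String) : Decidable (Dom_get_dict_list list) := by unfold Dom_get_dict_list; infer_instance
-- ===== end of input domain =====

-- B replaces A's single dedup-as-you-go loop by two passes (group all items by length,
-- then order-preserving dedup of each bucket); objective: alternative decomposition, same cost.

-- ===== PORT A =====
-- one loop step of A's 'for i in list'
def pvStepA (d : PySem.Dict Int (List String)) (i : String) : PySem.Dict Int (List String) :=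
  match d.get? (PySem.Str.len i) with
  | some l =>
      if l ≠ [] then (if i ∈ l then d else d.insert (PySem.Str.len i) (l ++ [i]))
      else d.insert (PySem.Str.len i) [i]
  | none => d.insert (PySem.Str.len i) [i]

def get_dict_list (list : List String) : List (Int × List String) :=
  (list.foldl pvStepA PySem.Dict.empty).items

-- ===== PORT B =====
-- index.setdefault(len(i), []).append(i)  (exact: overwrite keeps key position, new key appends)
def pvStepI (d : PySem.Dict Int (List String)) (i : String) : PySem.Dict Int (List String) :=
  d.insert (PySem.Str.len i) (d.getD (PySem.Str.len i) [] ++ [i])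

-- B's inner loop: uniq = []; for x in bucket: if x not in uniq: uniq.append(x)
def pvDedup (bucket : List String) : List String :=
  bucket.foldl (fun u x => if x ∈ u then u else u ++ [x]) []

def get_dict_list_alt (list : List String) : List (Int × List String) :=
  let index := list.foldl pvStepI PySem.Dict.empty
  (index.items.foldl (fun r p => r.insert p.1 (pvDedup p.2)) PySem.Dict.empty).items

-- ===== PRECONDITION & SPEC =====
def Spec_get_dict_list (list : List String) (out : List (Int × List String)) : Prop := out = get_dict_list_alt list
instance (list : List String) (out : List (Int × List String)) : Decidable (Spec_get_dict_list list out) := by unfold Spec_get_dict_list; infer_instance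

-- ===== CLAIM (what is proved, stated in full; the proofs are below) =====
def Claim_equal_get_dict_list : Prop := ∀ (list : List String), Dom_get_dict_list list → Spec_get_dict_list list (get_dict_list list)

-- ===== LEMMAS AND PROOFS =====

-- B's inner dedup loop is PySem.Set.ofList
theorem pvDedup_foldl_eq (b : List String) : ∀ (u : PySem.Set String),
    b.foldl (fun u x => if x ∈ u then u else u ++ [x]) u = PySem.Set.update u b := by
  induction b with
  | nil => intro u; simp [PySem.Set.update]
  | cons x b ih =>
    intro u
    rw [List.foldl_cons, PySem.Set.update_cons,
      show (if x ∈ u then u else u ++ [x]) = PySem.Set.add u x from (PySem.Set.add_eq_ite u x).symm]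
    exact ih _

theorem pvDedup_eq_ofList (b : List String) : pvDedup b = PySem.Set.ofList b := by
  rw [pvDedup, pvDedup_foldl_eq, PySem.Set.update_nil_left]

-- the simulation map: dedup each bucket
def pvMapD (d : PySem.Dict Int (List String)) : PySem.Dict Int (List String) :=
  PySem.Dict.mk (d.items.map (fun p => (p.1, PySem.Set.ofList p.2)))

theorem get?_pvMapD (d : PySem.Dict Int (List String)) (k : Int) :
    (pvMapD d).get? k = (d.get? k).map PySem.Set.ofList := by
  obtain ⟨its⟩ := d
  induction its with
  | nil => rfl
  | cons p its ih =>
    simp only [pvMapD] at *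
    rw [List.map_cons, PySem.Dict.get?_mk_cons, PySem.Dict.get?_mk_cons]
    by_cases h : p.1 == k
    · simp [h]
    · simp only [h, Bool.false_eq_true, if_false]; exact ih

theorem pvMapD_contains (d : PySem.Dict Int (List String)) (k : Int) :
    (pvMapD d).contains k = d.contains k := by
  rw [PySem.Dict.contains_eq_isSome_get?, PySem.Dict.contains_eq_isSome_get?, get?_pvMapD]
  cases d.get? k <;> rfl

theorem ofList_ne_nil {b : List String} (h : b ≠ []) : PySem.Set.ofList b ≠ [] := by
  cases b with
  | nil => exact absurd rfl h
  | cons x b => rw [PySem.Set.ofList_cons]; exact List.cons_ne_nil _ _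

theorem step_comm (d : PySem.Dict Int (List String)) (i : String)
    (hnd : d.keys.Nodup) (hne : ∀ p ∈ d.items, p.2 ≠ []) :
    pvStepA (pvMapD d) i = pvMapD (pvStepI d i) := by
  cases h : d.get? (PySem.Str.len i) with
  | none =>
    have hc : d.contains (PySem.Str.len i) = false := by
      rw [PySem.Dict.contains_eq_isSome_get?, h]; rfl
    have hc' : (pvMapD d).contains (PySem.Str.len i) = false := by
      rw [pvMapD_contains]; exact hc
    have hm : (pvMapD d).get? (PySem.Str.len i) = none := by
      rw [get?_pvMapD, h]; rfl
    unfold pvStepA pvStepI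
    rw [hm, PySem.Dict.getD_of_get?_eq_none _ _ h]
    apply PySem.Dict.ext
    rw [PySem.Dict.items_insert_of_not_contains _ _ hc']
    show _ = ((d.insert (PySem.Str.len i) ([] ++ [i])).items.map
      (fun p => (p.1, PySem.Set.ofList p.2)))
    rw [PySem.Dict.items_insert_of_not_contains _ _ hc]
    simp [pvMapD, PySem.Set.ofList_cons, PySem.Set.ofList_nil, PySem.Set.discard]
  | some b =>
    have hmem : (PySem.Str.len i, b) ∈ d.items := PySem.Dict.mem_items_of_get?_eq_some d h
    have hb : b ≠ [] := hne _ hmem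
    have hc : d.contains (PySem.Str.len i) = true := by
      rw [PySem.Dict.contains_eq_isSome_get?, h]; rfl
    have hc' : (pvMapD d).contains (PySem.Str.len i) = true := by
      rw [pvMapD_contains]; exact hc
    have hm : (pvMapD d).get? (PySem.Str.len i) = some (PySem.Set.ofList b) := by
      rw [get?_pvMapD, h]; rfl
    unfold pvStepA pvStepI
    rw [hm, PySem.Dict.getD_of_get?_eq_some _ _ h]
    show (if PySem.Set.ofList b ≠ [] then _ else _) = _
    rw [if_pos (ofList_ne_nil hb)]
    by_cases hi : i ∈ b
    · have hi' : i ∈ PySem.Set.ofList b := (PySem.Set.mem_ofList b i).2 hi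
      rw [if_pos hi']
      apply PySem.Dict.ext
      show (pvMapD d).items = ((d.insert (PySem.Str.len i) (b ++ [i])).items.map
        (fun p => (p.1, PySem.Set.ofList p.2)))
      rw [PySem.Dict.items_insert_of_contains _ _ hc]
      simp only [pvMapD, List.map_map]
      apply (List.map_congr_left _).symm
      intro p hp
      by_cases hpk : (p.1 == PySem.Str.len i) = true
      · have hp1 : p.1 = PySem.Str.len i := eq_of_beq hpk
        have hpb : p.2 = b := by
          have h2 := PySem.Dict.get?_of_mem_items d (k := p.1) (v := p.2) hp hnd
          rw [hp1, h] at h2; exact (Option.some.inj h2).symm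
        simp only [Function.comp_apply, hpk, if_pos]
        rw [PySem.Set.ofList_append_singleton, PySem.Set.add_of_mem hi', ← hp1, ← hpb]
      · simp only [Function.comp_apply, if_neg hpk]
    · have hi' : i ∉ PySem.Set.ofList b := fun hx => hi ((PySem.Set.mem_ofList b i).1 hx)
      rw [if_neg hi']
      apply PySem.Dict.ext
      rw [PySem.Dict.items_insert_of_contains _ _ hc']
      show _ = ((d.insert (PySem.Str.len i) (b ++ [i])).items.map
        (fun p => (p.1, PySem.Set.ofList p.2)))
      rw [PySem.Dict.items_insert_of_contains _ _ hc]
      simp only [pvMapD, List.map_map]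
      apply List.map_congr_left
      intro p hp
      by_cases hpk : (p.1 == PySem.Str.len i) = true
      · have hp1 : p.1 = PySem.Str.len i := eq_of_beq hpk
        have hpb : p.2 = b := by
          have h2 := PySem.Dict.get?_of_mem_items d (k := p.1) (v := p.2) hp hnd
          rw [hp1, h] at h2; exact (Option.some.inj h2).symm
        simp only [Function.comp_apply, hpk, if_pos]
        rw [PySem.Set.ofList_append_singleton, PySem.Set.add_of_not_mem hi']
      · simp only [Function.comp_apply, if_neg hpk]

theorem stepI_nonempty (d : PySem.Dict Int (List String)) (i : String)
    (hne : ∀ p ∈ d.items, p.2 ≠ []) :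
    ∀ p ∈ (pvStepI d i).items, p.2 ≠ [] := by
  intro p hp
  unfold pvStepI at hp
  rcases (PySem.Dict.mem_items_insert _ _ _ _).1 hp with h | ⟨h, _⟩
  · subst h; simp
  · exact hne _ h

theorem fold_comm : ∀ (l : List String) (d : PySem.Dict Int (List String)),
    d.keys.Nodup → (∀ p ∈ d.items, p.2 ≠ []) →
    l.foldl pvStepA (pvMapD d) = pvMapD (l.foldl pvStepI d) := by
  intro l
  induction l with
  | nil => intro d _ _; rfl
  | cons i l ih =>
    intro d hnd hne
    simp only [List.foldl_cons]
    rw [step_comm d i hnd hne]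
    exact ih (pvStepI d i) (PySem.Dict.nodup_keys_insert _ _ _ hnd) (stepI_nonempty d i hne)

theorem nodup_keys_index (l : List String) :
    (l.foldl pvStepI PySem.Dict.empty).keys.Nodup := by
  have := PySem.Dict.nodup_keys_foldl_insert_key l (fun i => PySem.Str.len i)
    (fun d i => d.getD (PySem.Str.len i) [] ++ [i]) PySem.Dict.empty
    (PySem.Dict.nodup_keys_empty)
  exact this

-- ===== VERDICT (by name: the statement is the Claim_ definition above) =====
theorem get_dict_list_spec : Claim_equal_get_dict_list := by
  intro l _
  show get_dict_list l = get_dict_list_alt l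
  unfold get_dict_list get_dict_list_alt
  set I := l.foldl pvStepI PySem.Dict.empty with hI
  have hnd : I.keys.Nodup := nodup_keys_index l
  have h1 : l.foldl pvStepA PySem.Dict.empty = pvMapD I := by
    have : pvMapD PySem.Dict.empty = PySem.Dict.empty := rfl
    rw [← this]
    exact fold_comm l PySem.Dict.empty PySem.Dict.nodup_keys_empty (by intro p hp; cases hp)
  rw [h1]
  have h2 := PySem.Dict.items_foldl_insert_fresh I.items (fun p => p.1)
    (fun p => pvDedup p.2) PySem.Dict.empty
    (fun a _ => PySem.Dict.contains_empty _) hnd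
  simp only [h2]
  show _ = List.map _ I.items

  simp only [pvMapD]
  apply List.map_congr_left
  intro p _
  rw [pvDedup_eq_ofList]
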